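-- pv_equiv track=rewrite | github.com/AndrStp/JetBrains_Academy | Randomness/stage_2/predictor.py | count_patterns
-- ===== SOURCE A (Python) =====
-- def count_patterns(a_string: str) -> dict:
--     triads = {
--         '000': [0, 0],
--         '001': [0, 0],
--         '010': [0, 0],
--         '011': [0, 0],
--         '100': [0, 0],
--         '101': [0, 0],
--         '110': [0, 0],
--         '111': [0, 0]
--     }
--     sliced = [a_string[i:i+4] for i in range(0, len(a_string)) if len(a_string[i:i+4]) == 4]
--     for el in sliced:
--         if el[3:4] == '0':
--             triads[el[:3]][0] += 1
--         else:
--             triads[el[:3]][1] += 1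
--     return triads
-- ===== SOURCE B (Python) =====
-- def count_patterns(a_string: str) -> dict:
--     # single left-to-right pass with a rolling 3-char window; no string slicing
--     triads = {
--         '000': [0, 0],
--         '001': [0, 0],
--         '010': [0, 0],
--         '011': [0, 0],
--         '100': [0, 0],
--         '101': [0, 0],
--         '110': [0, 0],
--         '111': [0, 0]
--     }
--     window = []
--     for ch in a_string:
--         if len(window) == 3:
--             if ch == '0':
--                 triads[''.join(window)][0] += 1
--             else:
--                 triads[''.join(window)][1] += 1
--             window.pop(0)
--         window.append(ch)
--     return triads
-- ===== Notes on version B (the rewrite author's own statement) =====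
-- stated objective: alternative
-- what changed: Replaces A's build-a-list-of-all-4-char-slices-then-loop approach by a single character-by-character pass that maintains a rolling 3-char window and bumps the triad counter as each next bit arrives, with no string slicing at all.
import Mathlib
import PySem

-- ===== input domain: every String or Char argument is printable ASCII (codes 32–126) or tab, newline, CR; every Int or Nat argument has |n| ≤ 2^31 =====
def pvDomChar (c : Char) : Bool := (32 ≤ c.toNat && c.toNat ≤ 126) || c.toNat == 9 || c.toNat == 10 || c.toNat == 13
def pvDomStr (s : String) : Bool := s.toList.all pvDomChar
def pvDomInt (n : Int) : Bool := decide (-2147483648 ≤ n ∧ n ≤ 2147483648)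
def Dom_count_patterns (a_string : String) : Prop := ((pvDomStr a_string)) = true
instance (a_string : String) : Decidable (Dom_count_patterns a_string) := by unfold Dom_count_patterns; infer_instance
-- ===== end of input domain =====

-- B replaces A's slice-out-every-window-then-loop-over-the-slices structure by a single
-- character-by-character pass with a rolling 3-char window (objective: alternative, same cost).

-- ===== PORT A =====

-- a_string[i:i+4]  (PySem.Chars.slice is PySem.List.slice on the character list)
def pvWin (cs : List Char) (i : Int) : List Char :=
  PySem.List.slice cs (some i) (some (i + 4))

-- the literal dict `triads`
def pvTriads0 : PySem.Dict String (List Int) :=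
  PySem.Dict.ofList [("000", [0, 0]), ("001", [0, 0]), ("010", [0, 0]), ("011", [0, 0]),
                     ("100", [0, 0]), ("101", [0, 0]), ("110", [0, 0]), ("111", [0, 0])]

-- `el[:3]` used as the dict key
def pvKey (w : List Char) : String := String.ofList (PySem.Chars.slice w none (some 3))

-- `v[j] += 1`-style update on a stored [x, y] value (j is 0 or 1, always in range there)
def pvBump (j : Int) (t : Int) (v : List Int) : List Int :=
  PySem.List.pySetD v j (PySem.List.pyGetD v j 0 + t)

def count_patterns (a_string : String) : List (String × List Int) :=
  let cs := a_string.toList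
  let sliced := ((PySem.List.pyRange 0 (cs.length : Int) 1).filter
      (fun i => (pvWin cs i).length == 4)).map (fun i => pvWin cs i)
  let final := sliced.foldl (fun d el =>
      if PySem.Chars.slice el (some 3) (some 4) == ['0'] then
        -- `triads[el[:3]][0] += 1`; the [0,0] default of `modify` is unreachable under Pre_ (the key is present)
        d.modify (pvKey el) [0, 0] (pvBump 0 1)
      else
        d.modify (pvKey el) [0, 0] (pvBump 1 1)) pvTriads0
  final.items

-- ===== PORT B =====

-- one loop iteration of Source B: if the window is full, bump the triad for it keyed by the
-- incoming char, then roll the window (`window.pop(0); window.append(ch)` = drop 1 ++ [ch],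
-- exact since the window is nonempty there; `''.join(window)` on a char list = String.ofList)
def pvStepB (st : PySem.Dict String (List Int) × List Char) (ch : Char) :
    PySem.Dict String (List Int) × List Char :=
  if st.2.length == 3 then
    (if ch == '0' then st.1.modify (String.ofList st.2) [0, 0] (pvBump 0 1)
     else st.1.modify (String.ofList st.2) [0, 0] (pvBump 1 1),
     st.2.drop 1 ++ [ch])
  else (st.1, st.2 ++ [ch])

def count_patterns_alt (a_string : String) : List (String × List Int) :=
  (a_string.toList.foldl pvStepB (pvTriads0, [])).1.items

-- ===== PRECONDITION & SPEC =====
-- Pre_ excludes exactly the inputs on which A raises KeyError (B raises there too): with length ≥ 4,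
-- some character other than the last one is not a binary digit, so some window's 3-char prefix is not a triad key.
def Pre_count_patterns (a_string : String) : Prop :=
  a_string.toList.length < 4 ∨ (a_string.toList.dropLast.all (fun c => c == '0' || c == '1')) = true
instance (a_string : String) : Decidable (Pre_count_patterns a_string) := by
  unfold Pre_count_patterns; infer_instance

def pvWitness_count_patterns : String := "0100110"

def Spec_count_patterns (a_string : String) (out : List (String × List Int)) : Prop := out = count_patterns_alt a_string
instance (a_string : String) (out : List (String × List Int)) : Decidable (Spec_count_patterns a_string out) := by unfold Spec_count_patterns; infer_instance

-- ===== CLAIM (what is proved, stated in full; the proofs are below) =====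
def Claim_equal_count_patterns : Prop := ∀ (a_string : String), Dom_count_patterns a_string → Pre_count_patterns a_string → Spec_count_patterns a_string (count_patterns a_string)

-- ===== LEMMAS AND PROOFS =====

-- the list of all length-4 contiguous windows of a char list, as A's loop visits them
def pvWin4 : List Char → List (List Char)
  | a :: b :: c :: d :: rest => [a, b, c, d] :: pvWin4 (b :: c :: d :: rest)
  | _ => []

-- A's loop body as a named function
def pvBodyA (d : PySem.Dict String (List Int)) (el : List Char) : PySem.Dict String (List Int) :=
  if PySem.Chars.slice el (some 3) (some 4) == ['0'] then
    d.modify (pvKey el) [0, 0] (pvBump 0 1)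
  else
    d.modify (pvKey el) [0, 0] (pvBump 1 1)

theorem pv_clamp (n : Nat) (i : Int) (h0 : 0 ≤ i) : PySem.List.clampIdx n i = min i.toNat n := by
  simp [PySem.List.clampIdx]; omega

theorem pv_win_len_iff (cs : List Char) (i : Int) (h0 : 0 ≤ i) (hn : i < (cs.length : Int)) :
    (pvWin cs i).length = 4 ↔ i < (cs.length : Int) - 3 := by
  unfold pvWin
  rw [PySem.List.length_slice, pv_clamp _ _ h0, pv_clamp _ _ (by omega)]
  omega

-- A's filtered index list is range(len - 3): the window at i has length 4 iff i + 4 ≤ len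
theorem pv_filter_range (cs : List Char) :
    (PySem.List.pyRange 0 (cs.length : Int) 1).filter (fun i => (pvWin cs i).length == 4)
      = PySem.List.pyRange 0 ((cs.length : Int) - 3) 1 := by
  by_cases h : (cs.length : Int) - 3 ≤ 0
  · rw [PySem.List.pyRange_one_eq_nil h, List.filter_eq_nil_iff]
    intro i hi
    rw [PySem.List.mem_pyRange_one] at hi
    simp only [beq_iff_eq]
    rw [pv_win_len_iff cs i hi.1 hi.2]
    omega
  · rw [PySem.List.pyRange_one_append 0 ((cs.length : Int) - 3) (cs.length : Int) (by omega) (by omega),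
        List.filter_append]
    have h1 : (PySem.List.pyRange 0 ((cs.length : Int) - 3) 1).filter
        (fun i => (pvWin cs i).length == 4) = PySem.List.pyRange 0 ((cs.length : Int) - 3) 1 := by
      rw [List.filter_eq_self]
      intro i hi
      rw [PySem.List.mem_pyRange_one] at hi
      simp only [beq_iff_eq]
      exact (pv_win_len_iff cs i hi.1 (by omega)).mpr hi.2
    have h2 : (PySem.List.pyRange ((cs.length : Int) - 3) (cs.length : Int) 1).filter
        (fun i => (pvWin cs i).length == 4) = [] := by
      rw [List.filter_eq_nil_iff]
      intro i hi
      rw [PySem.List.mem_pyRange_one] at hi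
      simp only [beq_iff_eq]
      rw [pv_win_len_iff cs i (by omega) hi.2]
      omega
    rw [h1, h2, List.append_nil]

theorem pv_win_drop (cs : List Char) (i : Int) (h0 : 0 ≤ i) :
    pvWin cs i = (cs.drop i.toNat).take 4 := by
  unfold pvWin
  rw [PySem.List.slice_toNat (ha := h0) (hb := by omega)]
  congr 1
  omega

-- the windows list in drop/take form
theorem pv_win4_eq (cs : List Char) :
    pvWin4 cs = (List.range (cs.length - 3)).map (fun k => (cs.drop k).take 4) := by
  fun_induction pvWin4 cs with
  | case1 a b c d rest ih =>
    simp only [List.length_cons]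
    rw [show rest.length + 1 + 1 + 1 + 1 - 3 = rest.length + 1 by omega,
        List.range_succ_eq_map]
    simp only [List.map_cons, List.map_map]
    refine List.cons_eq_cons.mpr ⟨rfl, ?_⟩
    rw [ih, show (b :: c :: d :: rest).length - 3 = rest.length by simp]
    exact List.map_congr_left (fun k _ => rfl)
  | case2 l h =>
    rcases l with _ | ⟨a, _ | ⟨b, _ | ⟨c, _ | ⟨d, rest⟩⟩⟩⟩ <;> first
      | rfl
      | exact absurd rfl (h a b c d rest)

-- A's slice list IS the windows list
theorem pv_sliced_eq (cs : List Char) :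
    ((PySem.List.pyRange 0 (cs.length : Int) 1).filter
        (fun i => (pvWin cs i).length == 4)).map (fun i => pvWin cs i) = pvWin4 cs := by
  rw [pv_filter_range, PySem.List.pyRange_one, List.map_map, pv_win4_eq]
  have hn : ((cs.length : Int) - 3 - 0).toNat = cs.length - 3 := by omega
  rw [hn]
  refine List.map_congr_left (fun k _ => ?_)
  have := pv_win_drop cs (0 + (k : Int)) (by omega)
  simpa using this

-- on a full window, one B step performs A's body for the window [a,b,c,ch] and rolls on
theorem pv_stepB_full (d : PySem.Dict String (List Int)) (a b c ch : Char) :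
    pvStepB (d, [a, b, c]) ch = (pvBodyA d [a, b, c, ch], [b, c, ch]) := by
  simp only [pvStepB, pvBodyA, pvKey]
  have hsl : PySem.Chars.slice [a, b, c, ch] (some 3) (some 4) = [ch] := by
    simp [PySem.Chars.slice, PySem.List.slice, PySem.List.clampIdx]
  have hk : PySem.Chars.slice [a, b, c, ch] none (some 3) = [a, b, c] := by
    simp [PySem.Chars.slice, PySem.List.slice, PySem.List.clampIdx]
  rw [hsl, hk]
  simp only [List.length_cons, List.length_nil]
  norm_num

-- rolling invariant: from a full window, B's fold performs A's fold over the remaining windows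
theorem pv_roll (rest : List Char) : ∀ (a b c : Char) (d : PySem.Dict String (List Int)),
    (rest.foldl pvStepB (d, [a, b, c])).1 = (pvWin4 (a :: b :: c :: rest)).foldl pvBodyA d := by
  induction rest with
  | nil => intro a b c d; rfl
  | cons ch rest ih =>
    intro a b c d
    rw [List.foldl_cons, pv_stepB_full]
    rw [ih b c ch (pvBodyA d [a, b, c, ch])]
    rfl

-- B's full fold = A's fold over all windows (warm-up of the first ≤3 chars, then pv_roll)
theorem pv_fold_eq (cs : List Char) :
    (cs.foldl pvStepB (pvTriads0, [])).1 = (pvWin4 cs).foldl pvBodyA pvTriads0 := by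
  rcases cs with _ | ⟨a, _ | ⟨b, _ | ⟨c, rest⟩⟩⟩
  · rfl
  · rfl
  · rfl
  · have hwarm : (a :: b :: c :: rest).foldl pvStepB (pvTriads0, [])
        = rest.foldl pvStepB (pvTriads0, [a, b, c]) := by
      simp [List.foldl_cons, pvStepB]
    rw [hwarm, pv_roll]

theorem pv_main (a_string : String) :
    count_patterns a_string = count_patterns_alt a_string := by
  simp only [count_patterns, count_patterns_alt]
  rw [pv_sliced_eq, pv_fold_eq]
  rfl

-- ===== VERDICT (by name: the statement is the Claim_ definition above) =====
theorem count_patterns_spec : Claim_equal_count_patterns := by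
  intro a_string _hdom _hpre
  unfold Spec_count_patterns
  exact pv_main a_string
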